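-- pv_equiv track=rewrite | github.com/reemmoustafa/p2_evolution_rate | trans Prot.py | backtranslate
-- ===== SOURCE A (Python) =====
-- codon_table = {
--     'A': ('GCT', 'GCC', 'GCA', 'GCG'),
--     'C': ('TGT', 'TGC'),
--     'D': ('GAT', 'GAC'),
--     'E': ('GAA', 'GAG'),
--     'F': ('TTT', 'TTC'),
--     'G': ('GGT', 'GGC', 'GGA', 'GGG'),
--     'I': ('ATT', 'ATC', 'ATA'),
--     'H': ('CAT', 'CAC'),
--     'K': ('AAA', 'AAG'),
--     'L': ('TTA', 'TTG', 'CTT', 'CTC', 'CTA', 'CTG'),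
--     'M': ('ATG',),
--     'N': ('AAT', 'AAC'),
--     'P': ('CCT', 'CCC', 'CCA', 'CCG'),
--     'Q': ('CAA', 'CAG'),
--     'R': ('CGT', 'CGC', 'CGA', 'CGG', 'AGA', 'AGG'),
--     'S': ('TCT', 'TCC', 'TCA', 'TCG', 'AGT', 'AGC'),
--     'T': ('ACT', 'ACC', 'ACA', 'ACG'),
--     'V': ('GTT', 'GTC', 'GTA', 'GTG'),
--     'W': ('TGG',),
--     'Y': ('TAT', 'TAC'),
--     '*': ('TAA', 'TAG', 'TGA'),
-- }
--
-- def backtranslate(protein, codon_table=codon_table):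
--     """Returns the back-translated nucleotide sequences for a alg_protein and codon
--     table combination.
--
--     >>> alg_protein = 'FVC'
--     >>> len(backtranslate(alg_protein))
--     16
--     """
--     # create initial sequences == list of codons for the first amino acid
--     sequences = [codon for codon in codon_table[protein[0]]]
--     for amino_acid in protein[1:]:
--         # add each codon to each existing sequence replacing sequences
--         # leaves (num_codons * num_sequences) for next amino acid
--         to_extend = sequences
--         sequences = []
--         for codon in codon_table[amino_acid]:
--             for sequence in to_extend:
--                 sequence += codon
--                 sequences.append(sequence)
--     return sequences
-- ===== SOURCE B (Python) =====
-- codon_table = {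
--     'A': ('GCT', 'GCC', 'GCA', 'GCG'),
--     'C': ('TGT', 'TGC'),
--     'D': ('GAT', 'GAC'),
--     'E': ('GAA', 'GAG'),
--     'F': ('TTT', 'TTC'),
--     'G': ('GGT', 'GGC', 'GGA', 'GGG'),
--     'I': ('ATT', 'ATC', 'ATA'),
--     'H': ('CAT', 'CAC'),
--     'K': ('AAA', 'AAG'),
--     'L': ('TTA', 'TTG', 'CTT', 'CTC', 'CTA', 'CTG'),
--     'M': ('ATG',),
--     'N': ('AAT', 'AAC'),
--     'P': ('CCT', 'CCC', 'CCA', 'CCG'),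
--     'Q': ('CAA', 'CAG'),
--     'R': ('CGT', 'CGC', 'CGA', 'CGG', 'AGA', 'AGG'),
--     'S': ('TCT', 'TCC', 'TCA', 'TCG', 'AGT', 'AGC'),
--     'T': ('ACT', 'ACC', 'ACA', 'ACG'),
--     'V': ('GTT', 'GTC', 'GTA', 'GTG'),
--     'W': ('TGG',),
--     'Y': ('TAT', 'TAC'),
--     '*': ('TAA', 'TAG', 'TGA'),
-- }
--
-- def backtranslate(protein, codon_table=codon_table):
--     """Recursive back-translation: peel the LAST amino acid; the prefix's
--     sequences vary fastest, the final codon slowest (same order as A)."""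
--     if len(protein) == 1:
--         return [codon for codon in codon_table[protein[0]]]
--     return [s + codon for codon in codon_table[protein[-1]]
--             for s in backtranslate(protein[:-1], codon_table)]
-- ===== Notes on version B (the rewrite author's own statement) =====
-- stated objective: alternative
-- what changed: A's iterative loop that repeatedly rebuilds the whole sequence list is replaced by a recursion that peels the last amino acid and appends each of its codons to the recursively back-translated prefix (same output order: prefix varies fastest, final codon slowest).
import Mathlib
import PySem

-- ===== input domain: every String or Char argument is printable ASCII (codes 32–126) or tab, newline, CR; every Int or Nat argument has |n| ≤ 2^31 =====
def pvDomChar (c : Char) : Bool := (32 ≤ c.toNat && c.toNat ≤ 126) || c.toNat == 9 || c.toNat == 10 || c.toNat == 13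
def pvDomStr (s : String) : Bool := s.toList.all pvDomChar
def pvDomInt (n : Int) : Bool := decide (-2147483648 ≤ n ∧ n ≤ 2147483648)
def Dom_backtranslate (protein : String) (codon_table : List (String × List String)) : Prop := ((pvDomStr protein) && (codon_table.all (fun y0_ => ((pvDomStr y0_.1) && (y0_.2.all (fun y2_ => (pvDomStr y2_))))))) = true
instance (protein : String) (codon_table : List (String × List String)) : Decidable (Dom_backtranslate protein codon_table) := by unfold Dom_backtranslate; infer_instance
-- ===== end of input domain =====

-- B replaces A's iterative rebuild-the-list-of-sequences loop by a recursion that peels the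
-- last amino acid and appends its codons to the recursively built prefix sequences (alternative
-- decomposition, same cost). Equivalence is about the return value; neither mutates its arguments.

-- dict indexing codon_table[x] (shared lookup primitive; lookup = first match)
def pvCodons (codon_table : List (String × List String)) (c : Char) : List String :=
  PySem.Dict.getD (PySem.Dict.mk codon_table) (String.ofList [c]) []

-- ===== PORT A =====
def backtranslate (protein : String) (codon_table : List (String × List String)) : List String :=
  match protein.toList with
  | [] => []   -- Python raises IndexError on protein[0]; excluded by Pre_backtranslate
  | c :: rest =>
    -- sequences = [codon for codon in codon_table[protein[0]]]
    let init := pvCodons codon_table c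
    -- for amino_acid in protein[1:]: …
    rest.foldl
      (fun sequences amino_acid =>
        let to_extend := sequences
        (pvCodons codon_table amino_acid).foldl
          (fun seqs codon =>
            to_extend.foldl (fun seqs sequence => seqs ++ [sequence ++ codon]) seqs)
          [])
      init

-- ===== PORT B =====
-- recursion of Source B on the character list of `protein`
def altGo (codon_table : List (String × List String)) : List Char → List String
  | [] => []   -- Python raises IndexError on protein[-1]; excluded by Pre_backtranslate
  | [c] => pvCodons codon_table c
  | c :: d :: rest =>
      (pvCodons codon_table ((d :: rest).getLast (by simp))).flatMap
        (fun codon => (altGo codon_table (c :: (d :: rest).dropLast)).map (fun s => s ++ codon))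
termination_by cs => cs.length
decreasing_by simp

def backtranslate_alt (protein : String) (codon_table : List (String × List String)) : List String :=
  altGo codon_table protein.toList

-- ===== PRECONDITION & SPEC =====
-- Pre_: exactly where Python A returns normally — nonempty protein whose every amino acid is a key
-- of codon_table (otherwise A raises IndexError / KeyError).
def Pre_backtranslate (protein : String) (codon_table : List (String × List String)) : Prop :=
  protein.toList ≠ [] ∧
  protein.toList.all
    (fun c => (PySem.Dict.get? (PySem.Dict.mk codon_table) (String.ofList [c])).isSome) = true
instance (protein : String) (codon_table : List (String × List String)) : Decidable (Pre_backtranslate protein codon_table) := by unfold Pre_backtranslate; infer_instance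

def pvWitness_backtranslate : String × (List (String × List String)) :=
  ("FV", [("F", ["TTT", "TTC"]), ("V", ["GTT", "GTC", "GTA", "GTG"])])

def Spec_backtranslate (protein : String) (codon_table : List (String × List String)) (out : List String) : Prop := out = backtranslate_alt protein codon_table
instance (protein : String) (codon_table : List (String × List String)) (out : List String) : Decidable (Spec_backtranslate protein codon_table out) := by unfold Spec_backtranslate; infer_instance

-- ===== CLAIM (what is proved, stated in full; the proofs are below) =====
def Claim_equal_backtranslate : Prop := ∀ (protein : String) (codon_table : List (String × List String)), Dom_backtranslate protein codon_table → Pre_backtranslate protein codon_table → Spec_backtranslate protein codon_table (backtranslate protein codon_table)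

-- ===== LEMMAS AND PROOFS =====

-- A's innermost loop appends sequence ++ codon for each existing sequence
lemma foldl_push_map (toE : List String) (codon : String) (acc : List String) :
    toE.foldl (fun seqs sequence => seqs ++ [sequence ++ codon]) acc
      = acc ++ toE.map (fun s => s ++ codon) := by
  induction toE generalizing acc with
  | nil => simp
  | cons x xs ih => simp [List.foldl_cons, ih]

-- A's middle loop over the codons of one amino acid is a flatMap
lemma foldl_codons_flatMap (cods toE acc : List String) :
    cods.foldl
        (fun seqs codon => toE.foldl (fun seqs sequence => seqs ++ [sequence ++ codon]) seqs)
        acc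
      = acc ++ cods.flatMap (fun codon => toE.map (fun s => s ++ codon)) := by
  induction cods generalizing acc with
  | nil => simp
  | cons x xs ih =>
      rw [List.foldl_cons, foldl_push_map, ih, List.flatMap_cons, List.append_assoc]

-- B peels a trailing amino acid
lemma altGo_snoc (ct : List (String × List String)) (c : Char) (rs : List Char) (a : Char) :
    altGo ct (c :: (rs ++ [a]))
      = (pvCodons ct a).flatMap (fun codon => (altGo ct (c :: rs)).map (fun s => s ++ codon)) := by
  cases rs with
  | nil => simp [altGo]
  | cons r rs' =>
      rw [show c :: ((r :: rs') ++ [a]) = c :: r :: (rs' ++ [a]) from rfl, altGo]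
      have h1 : (r :: (rs' ++ [a])).dropLast = r :: rs' := by
        rw [← List.cons_append, List.dropLast_concat]
      simp [h1]

-- A's outer loop equals B's recursion
lemma foldl_eq_altGo (ct : List (String × List String)) (c : Char) (rest : List Char) :
    rest.foldl
        (fun sequences amino_acid =>
          (pvCodons ct amino_acid).foldl
            (fun seqs codon =>
              sequences.foldl (fun seqs sequence => seqs ++ [sequence ++ codon]) seqs)
            [])
        (pvCodons ct c)
      = altGo ct (c :: rest) := by
  induction rest using List.reverseRecOn with
  | nil => simp [altGo]
  | append_singleton rs a ih =>
      rw [List.foldl_append, List.foldl_cons, List.foldl_nil, ih, altGo_snoc,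
        foldl_codons_flatMap, List.nil_append]

-- ===== VERDICT (by name: the statement is the Claim_ definition above) =====
theorem backtranslate_spec : Claim_equal_backtranslate := by
  intro protein ct _ _
  unfold Spec_backtranslate backtranslate backtranslate_alt
  cases h : protein.toList with
  | nil => simp [altGo]
  | cons c rest => exact foldl_eq_altGo ct c rest
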